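-- pv_equiv track=rewrite | github.com/drizztSun/common_project | PythonLeetcode/leetcodeM/737_SentenceSimilarityII.py | doit_disjoint
-- ===== SOURCE A (Python) =====
-- def doit_disjoint(words1: list, words2: list, pairs: list) -> bool:
--
--     if len(words1) != len(words2):
--         return False
--
--     parents = {}
--
--     def find(a):
--
--         if a not in parents:
--             parents[a] = a
--
--         while parents[a] != a:
--             parents[a] = parents[parents[a]]
--             a = parents[a]
--
--         return parents[a]
--
--     def union(a, b):
--         pa = find(a)
--         pb = find(b)
--
--         if pa != pb:
--             parents[pa] = pb
--
--     for c1, c2 in pairs: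
--         union(c1, c2)
--
--     for w1, w2 in zip(words1, words2):
--         if find(w1) != find(w2):
--             return False
--
--     return True
-- ===== SOURCE B (Python) =====
-- def doit_disjoint(words1: list, words2: list, pairs: list) -> bool:
--     # Quick-find: a flat representative map, eagerly relabelled on each union
--     # (no parent trees, no find loops).
--     if len(words1) != len(words2):
--         return False
--
--     rep = {}
--     for a, b in pairs:
--         ra = rep.setdefault(a, a)
--         rb = rep.setdefault(b, b)
--         if ra != rb:
--             rep = {k: (rb if v == ra else v) for k, v in rep.items()}
--
--     return all(rep.get(u, u) == rep.get(v, v) for u, v in zip(words1, words2))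
-- ===== Notes on version B (the rewrite author's own statement) =====
-- stated objective: alternative
-- what changed: Replaces the union-find forest (parent dict, path-compressing find loops, lazy union) by a flat quick-find representative map that is eagerly relabelled on each union and read back with a single dict lookup per word.
import Mathlib
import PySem

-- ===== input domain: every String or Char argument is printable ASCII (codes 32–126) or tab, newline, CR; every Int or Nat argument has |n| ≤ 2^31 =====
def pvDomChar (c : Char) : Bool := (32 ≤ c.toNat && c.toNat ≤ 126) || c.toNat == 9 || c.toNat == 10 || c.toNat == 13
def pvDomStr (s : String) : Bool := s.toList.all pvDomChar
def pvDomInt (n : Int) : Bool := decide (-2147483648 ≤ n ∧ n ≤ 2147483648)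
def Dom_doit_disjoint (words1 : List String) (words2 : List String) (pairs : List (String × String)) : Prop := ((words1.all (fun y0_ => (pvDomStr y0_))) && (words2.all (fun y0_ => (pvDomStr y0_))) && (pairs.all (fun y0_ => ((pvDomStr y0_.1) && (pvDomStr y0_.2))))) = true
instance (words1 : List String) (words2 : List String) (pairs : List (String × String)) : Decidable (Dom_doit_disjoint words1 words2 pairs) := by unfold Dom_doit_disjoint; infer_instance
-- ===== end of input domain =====

-- B replaces A's union-find forest (parent dict + path-compressing find) by a flat
-- quick-find representative map, eagerly relabelled on each union (objective: alternative).

-- ===== PORT A =====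
-- the 'while parents[a] != a' loop of find; fuel makes it total (Python's loop
-- terminates on every state A actually builds, and the fuel given below suffices there).
-- 'parents[parents[a]]' uses getD: on A's states the key is always present, so getD is exact.
def pvFindLoop : Nat → PySem.Dict String String → String → String × PySem.Dict String String
  | 0, p, a => (a, p)
  | f+1, p, a =>
    if p.getD a a = a then (a, p)          -- loop exit: returns parents[a] = a
    else
      let v := p.getD a a
      let g := p.getD v v                  -- parents[parents[a]]
      let p' := p.insert a g               -- parents[a] = parents[parents[a]]
      pvFindLoop f p' g                    -- a = parents[a]

-- def find(a): 'if a not in parents: parents[a] = a', then the while loop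
def pvFind (p : PySem.Dict String String) (a : String) : String × PySem.Dict String String :=
  let p0 := if p.contains a then p else p.insert a a
  pvFindLoop (p0.size + 1) p0 a

-- def union(a, b)
def pvUnion (p : PySem.Dict String String) (a b : String) : PySem.Dict String String :=
  let fa := pvFind p a
  let fb := pvFind fa.2 b
  if fa.1 ≠ fb.1 then fb.2.insert fa.1 fb.1 else fb.2

-- 'for w1, w2 in zip(words1, words2): if find(w1) != find(w2): return False'
def pvCheckA : PySem.Dict String String → List (String × String) → Bool
  | _, [] => true
  | p, w :: rest =>
    let f1 := pvFind p w.1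
    let f2 := pvFind f1.2 w.2
    if f1.1 ≠ f2.1 then false else pvCheckA f2.2 rest

def doit_disjoint (words1 : List String) (words2 : List String) (pairs : List (String × String)) : Bool :=
  if words1.length ≠ words2.length then false
  else
    let parents := pairs.foldl (fun p c => pvUnion p c.1 c.2) PySem.Dict.empty
    pvCheckA parents (words1.zip words2)

-- ===== PORT B =====
-- 'rep = {k: (rb if v == ra else v) for k, v in rep.items()}'
def pvRelabel (rep : PySem.Dict String String) (ra rb : String) : PySem.Dict String String :=
  PySem.Dict.mk (rep.items.map (fun kv => (kv.1, if kv.2 = ra then rb else kv.2)))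

-- one iteration of B's 'for a, b in pairs' loop
def pvStepB (rep : PySem.Dict String String) (a b : String) : PySem.Dict String String :=
  let ra := (rep.get? a).getD a            -- rep.setdefault(a, a) : returned value
  let rep1 := rep.setdefault a a
  let rb := (rep1.get? b).getD b           -- rep1.setdefault(b, b) : returned value
  let rep2 := rep1.setdefault b b
  if ra ≠ rb then pvRelabel rep2 ra rb else rep2

def doit_disjoint_alt (words1 : List String) (words2 : List String) (pairs : List (String × String)) : Bool :=
  if words1.length ≠ words2.length then false
  else
    let rep := pairs.foldl (fun d c => pvStepB d c.1 c.2) PySem.Dict.empty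
    (words1.zip words2).all (fun uv => rep.getD uv.1 uv.1 == rep.getD uv.2 uv.2)

-- ===== PRECONDITION & SPEC =====
def Spec_doit_disjoint (words1 : List String) (words2 : List String) (pairs : List (String × String)) (out : Bool) : Prop := out = doit_disjoint_alt words1 words2 pairs
instance (words1 : List String) (words2 : List String) (pairs : List (String × String)) (out : Bool) : Decidable (Spec_doit_disjoint words1 words2 pairs out) := by unfold Spec_doit_disjoint; infer_instance

-- ===== CLAIM (what is proved, stated in full; the proofs are below) =====
def Claim_equal_doit_disjoint : Prop := ∀ (words1 : List String) (words2 : List String) (pairs : List (String × String)), Dom_doit_disjoint words1 words2 pairs → Spec_doit_disjoint words1 words2 pairs (doit_disjoint words1 words2 pairs)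

-- ===== LEMMAS AND PROOFS =====

-- ---- ghost notions for A's parent forest ----

-- iterate the parent map n times
def pvIter (p : PySem.Dict String String) : Nat → String → String
  | 0, a => a
  | n+1, a => pvIter p n (p.getD a a)

def pvIsRoot (p : PySem.Dict String String) (x : String) : Prop := p.getD x x = x

def pvIsRootOf (p : PySem.Dict String String) (a r : String) : Prop :=
  (∃ n, pvIter p n a = r) ∧ pvIsRoot p r

-- the forest invariant: every chain reaches a root, and keys are distinct
def pvInvA (p : PySem.Dict String String) : Prop :=
  (∀ a, ∃ n, pvIsRoot p (pvIter p n a)) ∧ p.keys.Nodup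

-- same root = same class
def pvEqA (p : PySem.Dict String String) (x y : String) : Prop :=
  ∃ r, pvIsRootOf p x r ∧ pvIsRootOf p y r

-- equivalence closure of the processed pairs (the common ghost spec of both sides)
inductive pvEqCl (ps : List (String × String)) : String → String → Prop
  | of {a b : String} : (a, b) ∈ ps → pvEqCl ps a b
  | refl (a : String) : pvEqCl ps a a
  | symm {a b : String} : pvEqCl ps a b → pvEqCl ps b a
  | trans {a b c : String} : pvEqCl ps a b → pvEqCl ps b c → pvEqCl ps a c


-- basic iterate algebra
theorem pvIter_add (p : PySem.Dict String String) (m n : Nat) (a : String) :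
    pvIter p (m + n) a = pvIter p n (pvIter p m a) := by
  induction m generalizing a with
  | zero => simp [pvIter]
  | succ m ih =>
    have : m + 1 + n = (m + n) + 1 := by omega
    rw [this]
    simp only [pvIter]
    exact ih _

theorem pvIter_root (p : PySem.Dict String String) {r : String} (h : pvIsRoot p r) (n : Nat) :
    pvIter p n r = r := by
  induction n with
  | zero => rfl
  | succ n ih =>
    have h' : p.getD r r = r := h
    simp only [pvIter, h', ih]

theorem pvIsRootOf_unique {p : PySem.Dict String String} {a r1 r2 : String}
    (h1 : pvIsRootOf p a r1) (h2 : pvIsRootOf p a r2) : r1 = r2 := by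
  obtain ⟨⟨n1, e1⟩, hr1⟩ := h1
  obtain ⟨⟨n2, e2⟩, hr2⟩ := h2
  have c1 : pvIter p (n1 + n2) a = r1 := by
    rw [pvIter_add, e1]
    exact pvIter_root p hr1 n2
  have c2 : pvIter p (n1 + n2) a = r2 := by
    rw [Nat.add_comm, pvIter_add, e2]
    exact pvIter_root p hr2 n1
  rw [c1] at c2; exact c2

theorem pvIsRootOf_iter_iff {p : PySem.Dict String String} (m : Nat) (a r : String) :
    pvIsRootOf p (pvIter p m a) r ↔ pvIsRootOf p a r := by
  constructor
  · rintro ⟨⟨n, e⟩, hr⟩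
    exact ⟨⟨m + n, by rw [pvIter_add, e]⟩, hr⟩
  · rintro ⟨⟨n, e⟩, hr⟩
    refine ⟨⟨n, ?_⟩, hr⟩
    rw [← pvIter_add, Nat.add_comm, pvIter_add, e]
    exact pvIter_root p hr m

-- pointwise-equal self-lookups give the same chains
theorem pvIter_congr {p q : PySem.Dict String String}
    (h : ∀ x, p.getD x x = q.getD x x) (n : Nat) (a : String) :
    pvIter p n a = pvIter q n a := by
  induction n generalizing a with
  | zero => rfl
  | succ n ih => simp only [pvIter, h, ih]

theorem pvIsRootOf_congr {p q : PySem.Dict String String}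
    (h : ∀ x, p.getD x x = q.getD x x) (a r : String) :
    pvIsRootOf p a r ↔ pvIsRootOf q a r := by
  unfold pvIsRootOf pvIsRoot
  rw [h r]
  constructor <;> (rintro ⟨⟨n, e⟩, hr⟩; exact ⟨⟨n, by rw [← e, pvIter_congr h]⟩, hr⟩)
  -- second direction needs the symmetric congr; handled by the same rewrite

theorem pvInvA_exists_congr {p q : PySem.Dict String String}
    (h : ∀ x, p.getD x x = q.getD x x) (hp : ∀ a, ∃ n, pvIsRoot p (pvIter p n a)) :
    ∀ a, ∃ n, pvIsRoot q (pvIter q n a) := by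
  intro a
  obtain ⟨n, hn⟩ := hp a
  refine ⟨n, ?_⟩
  unfold pvIsRoot at *
  rw [← pvIter_congr h, ← h]
  exact hn

theorem pvGetD_insert_self_self (p : PySem.Dict String String) (a g x : String) :
    (p.insert a g).getD x x = if x = a then g else p.getD x x := by
  simp [PySem.Dict.getD_insert]

-- a two-step jump target differs from its source on an invariant forest
theorem pvG_ne {p : PySem.Dict String String} {a : String}
    (hna : ¬ pvIsRoot p a) (hInv : pvInvA p) : pvIter p 2 a ≠ a := by
  intro hg
  set v := p.getD a a with hv
  have hva : v ≠ a := fun h => hna h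
  have hgv : p.getD v v = a := by
    have : pvIter p 2 a = p.getD v v := by simp [pvIter, ← hv]
    rw [← this, hg]
  have halt : ∀ n, pvIter p n a = a ∨ pvIter p n a = v := by
    intro n
    induction n with
    | zero => exact Or.inl rfl
    | succ n ih =>
      rcases ih with h | h
      · right
        have : pvIter p (n + 1) a = pvIter p 1 (pvIter p n a) := by
          rw [← pvIter_add]
        rw [this, h]; simp [pvIter, ← hv]
      · left
        have : pvIter p (n + 1) a = pvIter p 1 (pvIter p n a) := by
          rw [← pvIter_add]
        rw [this, h]; simp [pvIter, hgv]
  obtain ⟨n, hn⟩ := hInv.1 a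
  rcases halt n with h | h <;> rw [h] at hn
  · exact hna hn
  · unfold pvIsRoot at hn; rw [hgv] at hn; exact hva hn.symm


-- chain transfer for the path-compression rewrite parents[a] := parents[parents[a]]
theorem pvShortcut_chain {p : PySem.Dict String String} {a : String}
    (hna : ¬ pvIsRoot p a) (hInv : pvInvA p) :
    ∀ n x, pvIsRoot p (pvIter p n x) →
      ∃ m ≤ n, pvIter (p.insert a (pvIter p 2 a)) m x = pvIter p n x ∧
        pvIsRoot (p.insert a (pvIter p 2 a)) (pvIter p n x) := by
  set g := pvIter p 2 a with hgdef
  have hgne : g ≠ a := pvG_ne hna hInv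
  set q := p.insert a g with hq
  have hget : ∀ x, q.getD x x = if x = a then g else p.getD x x := fun x =>
    pvGetD_insert_self_self p a g x
  have hrootq : ∀ r, pvIsRoot p r → pvIsRoot q r := by
    intro r hr
    have hra : r ≠ a := fun h => hna (h ▸ hr)
    unfold pvIsRoot at *
    rw [hget, if_neg hra]; exact hr
  intro n
  induction n using Nat.strong_induction_on with
  | _ n ih =>
    intro x hx
    by_cases hr : pvIsRoot p x
    · refine ⟨0, Nat.zero_le n, ?_, ?_⟩
      · rw [pvIter_root p hr n]; rfl
      · rw [pvIter_root p hr n]; exact hrootq x hr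
    · match n, hx with
      | 0, hx => exact absurd hx hr
      | (n'+1), hx =>
        by_cases hxa : x = a
        · subst hxa
          match n', hx with
          | 0, hx =>
            -- parents[x] is already a root; the jump target g is that root
            have hv : pvIter p 1 x = p.getD x x := rfl
            have hvroot : pvIsRoot p (p.getD x x) := hx
            have hgv : g = p.getD x x := by
              have : pvIter p 2 x = pvIter p 1 (pvIter p 1 x) := by rw [← pvIter_add]
              rw [hgdef, this, hv]
              exact pvIter_root p hvroot 1
            refine ⟨1, by omega, ?_, ?_⟩
            · show pvIter q 0 (q.getD x x) = p.getD x x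
              simp only [pvIter]
              rw [hget, if_pos rfl, hgv]
            · exact hrootq _ hvroot
          | (k+1), hx =>
            have asg : pvIter p (k + 2) x = pvIter p k g := by
              rw [hgdef]
              have : k + 2 = 2 + k := by omega
              rw [this, pvIter_add]
            have hxk : pvIsRoot p (pvIter p k g) := by rw [← asg]; exact hx
            obtain ⟨m, hm, e, hrq⟩ := ih k (by omega) g hxk
            refine ⟨m + 1, by omega, ?_, ?_⟩
            · have step : pvIter q (m + 1) x = pvIter q m (q.getD x x) := rfl
              rw [step, hget, if_pos rfl, e, asg]
            · rw [asg]; exact hrq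
        · have step : pvIter p (n' + 1) x = pvIter p n' (p.getD x x) := rfl
          have hx' : pvIsRoot p (pvIter p n' (p.getD x x)) := by rw [← step]; exact hx
          obtain ⟨m, hm, e, hrq⟩ := ih n' (by omega) (p.getD x x) hx'
          refine ⟨m + 1, by omega, ?_, ?_⟩
          · have stepq : pvIter q (m + 1) x = pvIter q m (q.getD x x) := rfl
            rw [stepq, hget, if_neg hxa, e, step]
          · rw [step]; exact hrq

theorem pvShortcut_rootOf {p : PySem.Dict String String} {a : String}
    (hna : ¬ pvIsRoot p a) (hInv : pvInvA p) (x r : String) :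
    pvIsRootOf (p.insert a (pvIter p 2 a)) x r ↔ pvIsRootOf p x r := by
  have hC := pvShortcut_chain hna hInv
  constructor
  · intro hq
    obtain ⟨n, hn⟩ := hInv.1 x
    obtain ⟨m, _, e, hrq⟩ := hC n x hn
    have hq' : pvIsRootOf (p.insert a (pvIter p 2 a)) x (pvIter p n x) := ⟨⟨m, e⟩, hrq⟩
    have := pvIsRootOf_unique hq hq'
    subst this
    exact ⟨⟨n, rfl⟩, hn⟩
  · rintro ⟨⟨n, e⟩, hr⟩
    have hx : pvIsRoot p (pvIter p n x) := by rw [e]; exact hr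
    obtain ⟨m, _, e', hrq⟩ := hC n x hx
    exact ⟨⟨m, by rw [e', e]⟩, by rw [← e]; exact hrq⟩

theorem pvShortcut_inv {p : PySem.Dict String String} {a : String}
    (hna : ¬ pvIsRoot p a) (hInv : pvInvA p) :
    pvInvA (p.insert a (pvIter p 2 a)) := by
  constructor
  · intro x
    obtain ⟨n, hn⟩ := hInv.1 x
    obtain ⟨m, _, e, hrq⟩ := pvShortcut_chain hna hInv n x hn
    exact ⟨m, by rw [e]; exact hrq⟩
  · exact PySem.Dict.nodup_keys_insert _ _ _ hInv.2

-- on an invariant forest every chain reaches its root within size-many steps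
theorem pvRootBound {p : PySem.Dict String String} (hInv : pvInvA p) (a : String) :
    ∃ n ≤ p.size, pvIsRoot p (pvIter p n a) := by
  classical
  have hex : ∃ n, pvIsRoot p (pvIter p n a) := hInv.1 a
  let N := Nat.find hex
  have hN : pvIsRoot p (pvIter p N a) := Nat.find_spec hex
  have hmin : ∀ m < N, ¬ pvIsRoot p (pvIter p m a) := fun m hm => Nat.find_min hex hm
  by_cases hle : N ≤ p.size
  · exact ⟨N, hle, hN⟩
  · exfalso
    have hkeys : ∀ i < N, pvIter p i a ∈ p.keys := by
      intro i hi
      have hnr : ¬ pvIsRoot p (pvIter p i a) := hmin i hi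
      by_contra hmem
      have hc : p.contains (pvIter p i a) = false := by
        rcases Bool.eq_false_or_eq_true (p.contains (pvIter p i a)) with h | h
        · exact absurd ((PySem.Dict.contains_iff_mem_keys _ _).1 h) hmem
        · exact h
      exact hnr (PySem.Dict.getD_of_not_contains _ _ hc)
    have hinj : ∀ i < N, ∀ j < N, pvIter p i a = pvIter p j a → i = j := by
      intro i hi j hj hij
      by_contra hne
      rcases Nat.lt_or_ge i j with hlt | hge
      · have : pvIter p (i + (N - j)) a = pvIter p N a := by
          rw [pvIter_add, hij, ← pvIter_add]
          congr 1; omega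
        have hroot : pvIsRoot p (pvIter p (i + (N - j)) a) := by rw [this]; exact hN
        exact hmin _ (by omega) hroot
      · have hlt : j < i := by omega
        have : pvIter p (j + (N - i)) a = pvIter p N a := by
          rw [pvIter_add, ← hij, ← pvIter_add]
          congr 1; omega
        have hroot : pvIsRoot p (pvIter p (j + (N - i)) a) := by rw [this]; exact hN
        exact hmin _ (by omega) hroot
    -- N distinct non-roots all lie among the (nodup) keys: N ≤ #keys = size
    have hcard : N ≤ p.keys.length := by
      have hsub : ∀ i : Fin N, pvIter p i.1 a ∈ p.keys.toFinset := by
        intro i; exact List.mem_toFinset.2 (hkeys i.1 i.2)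
      have hinj' : Function.Injective (fun i : Fin N => pvIter p i.1 a) := by
        intro i j hij
        exact Fin.ext (hinj i.1 i.2 j.1 j.2 hij)
      calc N = Fintype.card (Fin N) := (Fintype.card_fin N).symm
        _ ≤ Fintype.card p.keys.toFinset := Fintype.card_le_of_injective
              (fun i : Fin N => (⟨pvIter p i.1 a, hsub i⟩ : p.keys.toFinset))
              (fun i j h => hinj' (congrArg Subtype.val h))
        _ = p.keys.toFinset.card := Fintype.card_coe _
        _ ≤ p.keys.length := List.toFinset_card_le _
    have hsz : p.keys.length = p.size := by
      simp [PySem.Dict.keys, PySem.Dict.size]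
    omega


theorem pvFindLoop_spec : ∀ (fuel : Nat) (p : PySem.Dict String String) (a : String),
    pvInvA p → (∃ n ≤ fuel, pvIsRoot p (pvIter p n a)) →
    pvIsRootOf p a (pvFindLoop fuel p a).1 ∧ pvInvA (pvFindLoop fuel p a).2 ∧
      (∀ x r, pvIsRootOf (pvFindLoop fuel p a).2 x r ↔ pvIsRootOf p x r) := by
  intro fuel
  induction fuel with
  | zero =>
    intro p a hInv ⟨n, hn, hroot⟩
    interval_cases n
    simp only [pvFindLoop]
    exact ⟨⟨⟨0, rfl⟩, hroot⟩, hInv, fun x r => trivial⟩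
  | succ f ih =>
    intro p a hInv ⟨n, hn, hroot⟩
    by_cases hra : p.getD a a = a
    · simp only [pvFindLoop, if_pos hra]
      exact ⟨⟨⟨0, rfl⟩, hra⟩, hInv, fun x r => trivial⟩
    · have hna : ¬ pvIsRoot p a := hra
      have hg2 : p.getD (p.getD a a) (p.getD a a) = pvIter p 2 a := rfl
      simp only [pvFindLoop, if_neg hra, hg2]
      set g := pvIter p 2 a with hgdef
      set p' := p.insert a g with hp'
      have hInv' : pvInvA p' := pvShortcut_inv hna hInv
      have hiff : ∀ x r, pvIsRootOf p' x r ↔ pvIsRootOf p x r :=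
        pvShortcut_rootOf hna hInv
      -- a bounded witness for g in p'
      have hwit : ∃ m ≤ f, pvIsRoot p' (pvIter p' m g) := by
        have hn1 : 1 ≤ n := by
          rcases Nat.eq_zero_or_pos n with h0 | h1
          · subst h0; exact absurd hroot hna
          · exact h1
        match n, hn, hroot with
        | 1, hn, hroot =>
          -- parents[a] is a root; g is that root
          have hvroot : pvIsRoot p (pvIter p 1 a) := hroot
          have hgv : g = pvIter p 1 a := by
            rw [hgdef]
            have : (2 : Nat) = 1 + 1 := rfl
            rw [this, pvIter_add]
            exact pvIter_root p hvroot 1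
          refine ⟨0, Nat.zero_le f, ?_⟩
          have : pvIsRootOf p' g g := by
            rw [hiff]
            exact ⟨⟨0, rfl⟩, by rw [hgv]; exact hvroot⟩
          exact this.2
        | (k+2), hn, hroot =>
          have asg : pvIter p (k + 2) a = pvIter p k g := by
            rw [hgdef]
            have : k + 2 = 2 + k := by omega
            rw [this, pvIter_add]
          have hk : pvIsRoot p (pvIter p k g) := by rw [← asg]; exact hroot
          obtain ⟨m, hm, e, hrq⟩ := pvShortcut_chain hna hInv k g hk
          exact ⟨m, by omega, by rw [e]; exact hrq⟩
      obtain ⟨hres, hinvres, hiffres⟩ := ih p' g hInv' hwit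
      refine ⟨?_, hinvres, fun x r => (hiffres x r).trans (hiff x r)⟩
      have : pvIsRootOf p g (pvFindLoop f p' g).1 := (hiff _ _).1 hres
      exact (pvIsRootOf_iter_iff 2 a _).1 (hgdef ▸ this)

theorem pvFind_spec {p : PySem.Dict String String} (hInv : pvInvA p) (a : String) :
    pvIsRootOf p a (pvFind p a).1 ∧ pvInvA (pvFind p a).2 ∧
      (∀ x r, pvIsRootOf (pvFind p a).2 x r ↔ pvIsRootOf p x r) := by
  unfold pvFind
  by_cases hc : p.contains a
  · simp only [if_pos hc]
    obtain ⟨n, hn, hroot⟩ := pvRootBound hInv a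
    exact pvFindLoop_spec _ p a hInv ⟨n, by omega, hroot⟩
  · have hcf : p.contains a = false := by
      rcases Bool.eq_false_or_eq_true (p.contains a) with h | h
      · exact absurd h hc
      · exact h
    simp only [if_neg hc]
    set p0 := p.insert a a with hp0
    have hsame : ∀ x, p0.getD x x = p.getD x x := by
      intro x
      rw [hp0, pvGetD_insert_self_self]
      by_cases hxa : x = a
      · subst hxa
        rw [if_pos rfl, PySem.Dict.getD_of_not_contains _ _ hcf]
      · rw [if_neg hxa]
    have hInv0 : pvInvA p0 := by
      refine ⟨pvInvA_exists_congr (fun x => (hsame x).symm) hInv.1, ?_⟩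
      exact PySem.Dict.nodup_keys_insert _ _ _ hInv.2
    have hiff0 : ∀ x r, pvIsRootOf p0 x r ↔ pvIsRootOf p x r := fun x r =>
      pvIsRootOf_congr hsame x r
    obtain ⟨n, hn, hroot⟩ := pvRootBound hInv0 a
    obtain ⟨hres, hinvres, hiffres⟩ := pvFindLoop_spec (p0.size + 1) p0 a hInv0 ⟨n, by omega, hroot⟩
    exact ⟨(hiff0 _ _).1 hres, hinvres, fun x r => (hiffres x r).trans (hiff0 x r)⟩


-- linking two roots: every root through pa is redirected to pb
theorem pvLink_chain {p : PySem.Dict String String} {pa pb : String}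
    (_hInv : pvInvA p) (hpa : pvIsRoot p pa) (hpb : pvIsRoot p pb) (hne : pa ≠ pb) :
    ∀ n x, pvIsRoot p (pvIter p n x) →
      pvIsRootOf (p.insert pa pb) x (if pvIter p n x = pa then pb else pvIter p n x) := by
  set q := p.insert pa pb with hq
  have hget : ∀ x, q.getD x x = if x = pa then pb else p.getD x x := fun x =>
    pvGetD_insert_self_self p pa pb x
  have hqb : pvIsRoot q pb := by
    unfold pvIsRoot
    rw [hget, if_neg hne.symm]; exact hpb
  intro n
  induction n using Nat.strong_induction_on with
  | _ n ih =>
    intro x hx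
    by_cases hr : pvIsRoot p x
    · rw [pvIter_root p hr n]
      by_cases hxa : x = pa
      · rw [if_pos hxa]
        refine ⟨⟨1, ?_⟩, hqb⟩
        show pvIter q 0 (q.getD x x) = pb
        simp only [pvIter]
        rw [hget, if_pos hxa]
      · rw [if_neg hxa]
        refine ⟨⟨0, rfl⟩, ?_⟩
        unfold pvIsRoot
        rw [hget, if_neg hxa]; exact hr
    · match n, hx with
      | 0, hx => exact absurd hx hr
      | (n'+1), hx =>
        have hxpa : x ≠ pa := fun h => hr (h ▸ hpa)
        have step : pvIter p (n' + 1) x = pvIter p n' (p.getD x x) := rfl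
        have hx' : pvIsRoot p (pvIter p n' (p.getD x x)) := by rw [← step]; exact hx
        obtain ⟨⟨m, e⟩, hrq⟩ := ih n' (by omega) (p.getD x x) hx'
        rw [step]
        refine ⟨⟨m + 1, ?_⟩, hrq⟩
        have stepq : pvIter q (m + 1) x = pvIter q m (q.getD x x) := rfl
        rw [stepq, hget, if_neg hxpa, e]

theorem pvLink_rootOf {p : PySem.Dict String String} {pa pb : String}
    (hInv : pvInvA p) (hpa : pvIsRoot p pa) (hpb : pvIsRoot p pb) (hne : pa ≠ pb)
    (x r : String) :
    pvIsRootOf (p.insert pa pb) x r ↔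
      ∃ r0, pvIsRootOf p x r0 ∧ r = (if r0 = pa then pb else r0) := by
  constructor
  · intro hqr
    obtain ⟨n, hn⟩ := hInv.1 x
    have h2 := pvLink_chain hInv hpa hpb hne n x hn
    refine ⟨pvIter p n x, ⟨⟨n, rfl⟩, hn⟩, pvIsRootOf_unique hqr h2⟩
  · rintro ⟨r0, ⟨⟨n, e⟩, hr0⟩, rfl⟩
    have hx : pvIsRoot p (pvIter p n x) := by rw [e]; exact hr0
    have := pvLink_chain hInv hpa hpb hne n x hx
    rw [e] at this
    exact this

theorem pvLink_inv {p : PySem.Dict String String} {pa pb : String}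
    (hInv : pvInvA p) (hpa : pvIsRoot p pa) (hpb : pvIsRoot p pb) (hne : pa ≠ pb) :
    pvInvA (p.insert pa pb) := by
  constructor
  · intro x
    obtain ⟨n, hn⟩ := hInv.1 x
    obtain ⟨⟨m, e⟩, hrq⟩ := pvLink_chain hInv hpa hpb hne n x hn
    exact ⟨m, by rw [e]; exact hrq⟩
  · exact PySem.Dict.nodup_keys_insert _ _ _ hInv.2

theorem pvEqA_iff_roots {p : PySem.Dict String String} {x y rx ry : String}
    (hx : pvIsRootOf p x rx) (hy : pvIsRootOf p y ry) :
    pvEqA p x y ↔ rx = ry := by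
  constructor
  · rintro ⟨r, hr1, hr2⟩
    rw [pvIsRootOf_unique hx hr1, pvIsRootOf_unique hy hr2]
  · intro h; subst h; exact ⟨rx, hx, hy⟩

theorem pvEqA_congr {p q : PySem.Dict String String}
    (h : ∀ x r, pvIsRootOf q x r ↔ pvIsRootOf p x r) (x y : String) :
    pvEqA q x y ↔ pvEqA p x y := by
  unfold pvEqA
  constructor
  · rintro ⟨r, h1, h2⟩; exact ⟨r, (h x r).1 h1, (h y r).1 h2⟩
  · rintro ⟨r, h1, h2⟩; exact ⟨r, (h x r).2 h1, (h y r).2 h2⟩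

theorem pvUnion_spec_aux (p p2 : PySem.Dict String String) (a b pa pb : String)
    (hra : pvIsRootOf p a pa) (hrb : pvIsRootOf p b pb)
    (hInv : pvInvA p) (hInv2 : pvInvA p2)
    (hiff2' : ∀ x r, pvIsRootOf p2 x r ↔ pvIsRootOf p x r) :
    pvInvA (if pa ≠ pb then p2.insert pa pb else p2) ∧
      (∀ x y, pvEqA (if pa ≠ pb then p2.insert pa pb else p2) x y ↔
        (pvEqA p x y ∨ (pvEqA p x a ∧ pvEqA p y b) ∨ (pvEqA p x b ∧ pvEqA p y a))) := by
  have hroot : ∀ x, ∃ r, pvIsRootOf p x r := by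
    intro x
    obtain ⟨n, hn⟩ := hInv.1 x
    exact ⟨pvIter p n x, ⟨n, rfl⟩, hn⟩
  by_cases hcase : pa ≠ pb
  · rw [if_pos hcase]
    have hpa2 : pvIsRoot p2 pa := ((hiff2' pa pa).2 ⟨⟨0, rfl⟩, hra.2⟩).2
    have hpb2 : pvIsRoot p2 pb := ((hiff2' pb pb).2 ⟨⟨0, rfl⟩, hrb.2⟩).2
    refine ⟨pvLink_inv hInv2 hpa2 hpb2 hcase, ?_⟩
    intro x y
    obtain ⟨rx, hrx⟩ := hroot x
    obtain ⟨ry, hry⟩ := hroot y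
    have hrx2 : pvIsRootOf p2 x rx := (hiff2' x rx).2 hrx
    have hry2 : pvIsRootOf p2 y ry := (hiff2' y ry).2 hry
    have hqx : pvIsRootOf (p2.insert pa pb) x (if rx = pa then pb else rx) :=
      (pvLink_rootOf hInv2 hpa2 hpb2 hcase x _).2 ⟨rx, hrx2, rfl⟩
    have hqy : pvIsRootOf (p2.insert pa pb) y (if ry = pa then pb else ry) :=
      (pvLink_rootOf hInv2 hpa2 hpb2 hcase y _).2 ⟨ry, hry2, rfl⟩
    rw [pvEqA_iff_roots hqx hqy,
        pvEqA_iff_roots hrx hry,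
        pvEqA_iff_roots hrx hra,
        pvEqA_iff_roots hry hrb,
        pvEqA_iff_roots hrx hrb,
        pvEqA_iff_roots hry hra]
    by_cases h1 : rx = pa <;> by_cases h2 : ry = pa
    · rw [if_pos h1, if_pos h2]
      exact ⟨fun _ => Or.inl (h1.trans h2.symm), fun _ => rfl⟩
    · rw [if_pos h1, if_neg h2]
      constructor
      · intro h; exact Or.inr (Or.inl ⟨h1, h.symm⟩)
      · rintro (h | ⟨g1, g2⟩ | ⟨g1, g2⟩)
        · exact absurd (h.symm.trans h1) h2
        · exact g2.symm
        · exact absurd g2 h2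
    · rw [if_neg h1, if_pos h2]
      constructor
      · intro h; exact Or.inr (Or.inr ⟨h, h2⟩)
      · rintro (h | ⟨g1, g2⟩ | ⟨g1, g2⟩)
        · exact absurd (h.trans h2) h1
        · exact absurd g1 h1
        · exact g1
    · rw [if_neg h1, if_neg h2]
      constructor
      · exact Or.inl
      · rintro (h | ⟨g1, g2⟩ | ⟨g1, g2⟩)
        · exact h
        · exact absurd g1 h1
        · exact absurd g2 h2
  · rw [if_neg hcase]
    rw [not_ne_iff] at hcase
    refine ⟨hInv2, ?_⟩
    intro x y
    rw [pvEqA_congr hiff2']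
    obtain ⟨rx, hrx⟩ := hroot x
    obtain ⟨ry, hry⟩ := hroot y
    rw [pvEqA_iff_roots hrx hry,
        pvEqA_iff_roots hrx hra,
        pvEqA_iff_roots hry hrb,
        pvEqA_iff_roots hrx hrb,
        pvEqA_iff_roots hry hra]
    subst hcase
    constructor
    · exact Or.inl
    · rintro (h | ⟨h1, h2⟩ | ⟨h1, h2⟩)
      · exact h
      · rw [h1, h2]
      · rw [h1, h2]

theorem pvUnion_spec {p : PySem.Dict String String} (hInv : pvInvA p) (a b : String) :
    pvInvA (pvUnion p a b) ∧
      (∀ x y, pvEqA (pvUnion p a b) x y ↔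
        (pvEqA p x y ∨ (pvEqA p x a ∧ pvEqA p y b) ∨ (pvEqA p x b ∧ pvEqA p y a))) := by
  obtain ⟨hra, hInv1, hiff1⟩ := pvFind_spec hInv a
  obtain ⟨hrb1, hInv2, hiff2⟩ := pvFind_spec hInv1 b
  have hrb : pvIsRootOf p b (pvFind (pvFind p a).2 b).1 := (hiff1 _ _).1 hrb1
  have hiff2' : ∀ x r, pvIsRootOf (pvFind (pvFind p a).2 b).2 x r ↔ pvIsRootOf p x r :=
    fun x r => (hiff2 x r).trans (hiff1 x r)
  exact pvUnion_spec_aux p (pvFind (pvFind p a).2 b).2 a b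
    (pvFind p a).1 (pvFind (pvFind p a).2 b).1 hra hrb hInv hInv2 hiff2'


-- ---- the equivalence closure of the pair list ----

theorem pvEqCl_nil (x y : String) : pvEqCl [] x y ↔ x = y := by
  constructor
  · intro h
    induction h with
    | of h => exact absurd h (List.not_mem_nil)
    | refl a => rfl
    | symm _ ih => exact ih.symm
    | trans _ _ ih1 ih2 => exact ih1.trans ih2
  · rintro rfl; exact pvEqCl.refl x

theorem pvEqCl_mono {ps : List (String × String)} {c : String × String} {x y : String}
    (h : pvEqCl ps x y) : pvEqCl (ps ++ [c]) x y := by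
  induction h with
  | of h => exact pvEqCl.of (List.mem_append_left _ h)
  | refl a => exact pvEqCl.refl a
  | symm _ ih => exact ih.symm
  | trans _ _ ih1 ih2 => exact ih1.trans ih2

theorem pvEqCl_snoc (ps : List (String × String)) (a b x y : String) :
    pvEqCl (ps ++ [(a, b)]) x y ↔
      (pvEqCl ps x y ∨ (pvEqCl ps x a ∧ pvEqCl ps y b) ∨ (pvEqCl ps x b ∧ pvEqCl ps y a)) := by
  constructor
  · intro h
    induction h with
    | @of u v h =>
      rcases List.mem_append.1 h with h | h
      · exact Or.inl (pvEqCl.of h)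
      · rw [List.mem_singleton, Prod.mk.injEq] at h
        obtain ⟨rfl, rfl⟩ := h
        exact Or.inr (Or.inl ⟨pvEqCl.refl _, pvEqCl.refl _⟩)
    | refl a => exact Or.inl (pvEqCl.refl a)
    | symm _ ih =>
      rcases ih with h | ⟨h1, h2⟩ | ⟨h1, h2⟩
      · exact Or.inl h.symm
      · exact Or.inr (Or.inr ⟨h2, h1⟩)
      · exact Or.inr (Or.inl ⟨h2, h1⟩)
    | trans _ _ ih1 ih2 =>
      rcases ih1 with h | ⟨h1, h2⟩ | ⟨h1, h2⟩ <;>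
        rcases ih2 with g | ⟨g1, g2⟩ | ⟨g1, g2⟩
      · exact Or.inl (h.trans g)
      · exact Or.inr (Or.inl ⟨h.trans g1, g2⟩)
      · exact Or.inr (Or.inr ⟨h.trans g1, g2⟩)
      · exact Or.inr (Or.inl ⟨h1, g.symm.trans h2⟩)
      · exact Or.inl (h1.trans ((g1.symm.trans h2).trans g2.symm))
      · exact Or.inl (h1.trans g2.symm)
      · exact Or.inr (Or.inr ⟨h1, g.symm.trans h2⟩)
      · exact Or.inl (h1.trans g2.symm)
      · exact Or.inl (h1.trans ((g1.symm.trans h2).trans g2.symm))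
  · rintro (h | ⟨h1, h2⟩ | ⟨h1, h2⟩)
    · exact pvEqCl_mono h
    · exact (pvEqCl_mono h1).trans ((pvEqCl.of (List.mem_append_right _ (List.mem_singleton.2 rfl))).trans (pvEqCl_mono h2).symm)
    · exact (pvEqCl_mono h1).trans ((pvEqCl.of (List.mem_append_right _ (List.mem_singleton.2 rfl))).symm.trans (pvEqCl_mono h2).symm)


theorem pvFoldA_spec (ps : List (String × String)) :
    pvInvA (ps.foldl (fun p c => pvUnion p c.1 c.2) PySem.Dict.empty) ∧
      (∀ x y, pvEqA (ps.foldl (fun p c => pvUnion p c.1 c.2) PySem.Dict.empty) x y ↔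
        pvEqCl ps x y) := by
  induction ps using List.reverseRecOn with
  | nil =>
    have hget : ∀ x : String, (PySem.Dict.empty : PySem.Dict String String).getD x x = x := by
      intro x; simp [PySem.Dict.getD_empty]
    have hroot : ∀ x r : String, pvIsRootOf PySem.Dict.empty x r ↔ r = x := by
      intro x r
      constructor
      · rintro ⟨⟨n, e⟩, _⟩
        rw [← e, pvIter_root _ (hget x) n]
      · rintro rfl
        exact ⟨⟨0, rfl⟩, hget _⟩
    constructor
    · exact ⟨fun a => ⟨0, hget a⟩, PySem.Dict.nodup_keys_empty⟩
    · intro x y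
      simp only [List.foldl_nil]
      rw [pvEqCl_nil]
      constructor
      · rintro ⟨r, h1, h2⟩
        rw [← (hroot x r).1 h1, ← (hroot y r).1 h2]
      · rintro rfl
        exact ⟨x, (hroot x x).2 rfl, (hroot x x).2 rfl⟩
  | append_singleton ps c ih =>
    rw [List.foldl_append]
    simp only [List.foldl_cons, List.foldl_nil]
    obtain ⟨hInv, heq⟩ := ih
    obtain ⟨hInv', heq'⟩ := pvUnion_spec hInv c.1 c.2
    refine ⟨hInv', ?_⟩
    intro x y
    rw [heq' x y, heq x y, heq x c.1, heq y c.2, heq x c.2, heq y c.1, pvEqCl_snoc]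


-- ---- ghost notions for B's representative map ----

-- B's class of x is named by rep.get(x, x)
def pvRootB (d : PySem.Dict String String) (x : String) : String := d.getD x x

-- representatives are canonical and live among the keys
def pvInvB (d : PySem.Dict String String) : Prop :=
  (∀ x, d.getD (d.getD x x) (d.getD x x) = d.getD x x) ∧
  (∀ x, d.contains x = true → d.contains (d.getD x x) = true) ∧
  d.keys.Nodup

theorem pvSetdefault_getD (d : PySem.Dict String String) (a x : String) :
    (d.setdefault a a).getD x x = d.getD x x := by
  by_cases hc : d.contains a
  · rw [PySem.Dict.setdefault_of_contains _ _ hc]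
  · have hcf : d.contains a = false := by
      rcases Bool.eq_false_or_eq_true (d.contains a) with h | h
      · exact absurd h hc
      · exact h
    rw [PySem.Dict.setdefault_of_not_contains _ _ hcf, pvGetD_insert_self_self]
    by_cases hxa : x = a
    · subst hxa
      rw [if_pos rfl, PySem.Dict.getD_of_not_contains _ _ hcf]
    · rw [if_neg hxa]

theorem pvSetdefault_nodup (d : PySem.Dict String String) (a : String)
    (h : d.keys.Nodup) : (d.setdefault a a).keys.Nodup := by
  by_cases hc : d.contains a
  · rw [PySem.Dict.setdefault_of_contains _ _ hc]; exact h
  · have hcf : d.contains a = false := by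
      rcases Bool.eq_false_or_eq_true (d.contains a) with h' | h'
      · exact absurd h' hc
      · exact h'
    rw [PySem.Dict.setdefault_of_not_contains _ _ hcf]
    exact PySem.Dict.nodup_keys_insert _ _ _ h

theorem pvSetdefault_invB {d : PySem.Dict String String} (a : String)
    (hInv : pvInvB d) : pvInvB (d.setdefault a a) := by
  have hgd : ∀ x, (d.setdefault a a).getD x x = d.getD x x := pvSetdefault_getD d a
  refine ⟨?_, ?_, pvSetdefault_nodup d a hInv.2.2⟩
  · intro x
    rw [hgd, hgd]
    exact hInv.1 x
  · intro x hx
    rw [PySem.Dict.contains_setdefault] at hx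
    rw [hgd, PySem.Dict.contains_setdefault]
    have hx' : x = a ∨ d.contains x = true := by simpa using hx
    rcases hx' with hxa' | hcx
    · subst hxa'
      by_cases hc : d.contains x
      · rw [hInv.2.1 x hc]; simp
      · have hcf : d.contains x = false := by
          rcases Bool.eq_false_or_eq_true (d.contains x) with h | h
          · exact absurd h hc
          · exact h
        rw [PySem.Dict.getD_of_not_contains _ _ hcf]
        simp
    · rw [hInv.2.1 x hcx]; simp

theorem pvRelabel_get? (d : PySem.Dict String String) (ra rb k : String) :
    (pvRelabel d ra rb).get? k = (d.get? k).map (fun v => if v = ra then rb else v) := by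
  unfold pvRelabel
  have haux : ∀ (l : List (String × String)),
      (PySem.Dict.mk (l.map (fun kv => (kv.1, if kv.2 = ra then rb else kv.2)))).get? k =
        ((PySem.Dict.mk l).get? k).map (fun v => if v = ra then rb else v) := by
    intro l
    induction l with
    | nil => rfl
    | cons hd tl ih =>
      obtain ⟨k1, v1⟩ := hd
      simp only [List.map_cons, PySem.Dict.get?_mk_cons]
      cases hB : (k1 == k) with
      | false => simp only [Bool.false_eq_true, if_false]; exact ih
      | true => simp only [if_true]
                rfl
  exact haux d.items

theorem pvRelabel_keys (d : PySem.Dict String String) (ra rb : String) :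
    (pvRelabel d ra rb).keys = d.keys := by
  unfold pvRelabel
  simp [PySem.Dict.keys, List.map_map, Function.comp]

theorem pvRelabel_contains (d : PySem.Dict String String) (ra rb k : String) :
    (pvRelabel d ra rb).contains k = d.contains k := by
  rw [PySem.Dict.contains_eq_decide_mem_keys, PySem.Dict.contains_eq_decide_mem_keys,
    pvRelabel_keys]

theorem pvRelabel_getD {d : PySem.Dict String String} {ra : String} (rb : String)
    (hra : d.contains ra = true) (x : String) :
    (pvRelabel d ra rb).getD x x = if d.getD x x = ra then rb else d.getD x x := by
  rw [PySem.Dict.getD_eq_get?_getD, pvRelabel_get?]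
  cases hx : d.get? x with
  | some v =>
    rw [PySem.Dict.getD_eq_get?_getD, hx]
    rfl
  | none =>
    have hxc : d.contains x = false := by
      rw [PySem.Dict.contains_eq_isSome_get?, hx]; rfl
    rw [PySem.Dict.getD_of_not_contains _ _ hxc]
    have hxra : x ≠ ra := by
      intro h; subst h; rw [hra] at hxc; cases hxc
    rw [if_neg hxra]
    rfl


theorem pvStepB_spec {d : PySem.Dict String String} (hInv : pvInvB d) (a b : String) :
    pvInvB (pvStepB d a b) ∧
      (∀ x y, (pvRootB (pvStepB d a b) x = pvRootB (pvStepB d a b) y ↔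
        (pvRootB d x = pvRootB d y ∨
          (pvRootB d x = pvRootB d a ∧ pvRootB d y = pvRootB d b) ∨
          (pvRootB d x = pvRootB d b ∧ pvRootB d y = pvRootB d a)))) := by
  have hra : (d.get? a).getD a = pvRootB d a := (PySem.Dict.getD_eq_get?_getD d a a).symm
  have hgd1 : ∀ x, (d.setdefault a a).getD x x = d.getD x x := pvSetdefault_getD d a
  have hrb : ((d.setdefault a a).get? b).getD b = pvRootB d b := by
    rw [← PySem.Dict.getD_eq_get?_getD]
    exact hgd1 b
  have hInv1 : pvInvB (d.setdefault a a) := pvSetdefault_invB a hInv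
  have hInv2 : pvInvB ((d.setdefault a a).setdefault b b) := pvSetdefault_invB b hInv1
  set rep2 := (d.setdefault a a).setdefault b b with hrep2
  have hgd2 : ∀ x, rep2.getD x x = d.getD x x := by
    intro x
    rw [hrep2, pvSetdefault_getD, hgd1]
  have hca : rep2.contains a = true := by
    rw [hrep2, PySem.Dict.contains_setdefault, PySem.Dict.contains_setdefault]
    simp
  have hcb : rep2.contains b = true := by
    rw [hrep2, PySem.Dict.contains_setdefault]
    simp
  have hcra : rep2.contains (pvRootB d a) = true := by
    have := hInv2.2.1 a hca
    rw [hgd2 a] at this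
    exact this
  have hcrb : rep2.contains (pvRootB d b) = true := by
    have := hInv2.2.1 b hcb
    rw [hgd2 b] at this
    exact this
  have hstep : pvStepB d a b = (if pvRootB d a ≠ pvRootB d b then
      pvRelabel rep2 (pvRootB d a) (pvRootB d b) else rep2) := by
    show (if (d.get? a).getD a ≠ ((d.setdefault a a).get? b).getD b then
        pvRelabel ((d.setdefault a a).setdefault b b) ((d.get? a).getD a)
          (((d.setdefault a a).get? b).getD b)
      else (d.setdefault a a).setdefault b b) = _
    rw [hra, hrb]
  rw [hstep]
  by_cases hcase : pvRootB d a ≠ pvRootB d b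
  · rw [if_pos hcase]
    set ra := pvRootB d a with hradef
    set rb := pvRootB d b with hrbdef
    have hgdm : ∀ x, (pvRelabel rep2 ra rb).getD x x =
        if d.getD x x = ra then rb else d.getD x x := by
      intro x
      rw [pvRelabel_getD rb hcra x, hgd2 x]
    have hcanon : ∀ x, d.getD (d.getD x x) (d.getD x x) = d.getD x x := hInv.1
    have hrbcanon : d.getD rb rb = rb := by
      rw [hrbdef]
      exact hInv.1 b
    have hracanon : d.getD ra ra = ra := by
      rw [hradef]
      exact hInv.1 a
    constructor
    · refine ⟨?_, ?_, ?_⟩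
      · intro x
        simp only [hgdm]
        by_cases hxr : d.getD x x = ra
        · rw [if_pos hxr, hrbcanon, if_neg (Ne.symm hcase)]
        · rw [if_neg hxr, hcanon x, if_neg hxr]
      · intro x hx
        rw [pvRelabel_contains] at hx
        rw [hgdm, pvRelabel_contains]
        by_cases hxr : d.getD x x = ra
        · rw [if_pos hxr]; exact hcrb
        · rw [if_neg hxr]
          have := hInv2.2.1 x hx
          rw [hgd2 x] at this
          exact this
      · rw [pvRelabel_keys]; exact hInv2.2.2
    · intro x y
      unfold pvRootB
      rw [hgdm x, hgdm y]
      by_cases h1 : d.getD x x = ra <;> by_cases h2 : d.getD y y = ra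
      · rw [if_pos h1, if_pos h2]
        exact ⟨fun _ => Or.inl (h1.trans h2.symm), fun _ => rfl⟩
      · rw [if_pos h1, if_neg h2]
        constructor
        · intro h; exact Or.inr (Or.inl ⟨h1, h.symm⟩)
        · rintro (h | ⟨g1, g2⟩ | ⟨g1, g2⟩)
          · exact absurd (h.symm.trans h1) h2
          · exact g2.symm
          · exact absurd g2 h2
      · rw [if_neg h1, if_pos h2]
        constructor
        · intro h; exact Or.inr (Or.inr ⟨h, h2⟩)
        · rintro (h | ⟨g1, g2⟩ | ⟨g1, g2⟩)
          · exact absurd (h.trans h2) h1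
          · exact absurd g1 h1
          · exact g1
      · rw [if_neg h1, if_neg h2]
        constructor
        · exact Or.inl
        · rintro (h | ⟨g1, g2⟩ | ⟨g1, g2⟩)
          · exact h
          · exact absurd g1 h1
          · exact absurd g2 h2
  · rw [if_neg hcase]
    rw [not_ne_iff] at hcase
    refine ⟨hInv2, ?_⟩
    intro x y
    unfold pvRootB
    rw [hgd2 x, hgd2 y]
    constructor
    · exact fun h => Or.inl h
    · rintro (h | ⟨h1, h2⟩ | ⟨h1, h2⟩)
      · exact h
      · rw [h1, h2]; exact hcase
      · rw [h1, h2]; exact hcase.symm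


theorem pvFoldB_spec (ps : List (String × String)) :
    pvInvB (ps.foldl (fun d c => pvStepB d c.1 c.2) PySem.Dict.empty) ∧
      (∀ x y, (pvRootB (ps.foldl (fun d c => pvStepB d c.1 c.2) PySem.Dict.empty) x =
          pvRootB (ps.foldl (fun d c => pvStepB d c.1 c.2) PySem.Dict.empty) y ↔
        pvEqCl ps x y)) := by
  induction ps using List.reverseRecOn with
  | nil =>
    simp only [List.foldl_nil]
    refine ⟨⟨?_, ?_, PySem.Dict.nodup_keys_empty⟩, ?_⟩
    · intro x; simp [PySem.Dict.getD_empty]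
    · intro x hx; rw [PySem.Dict.contains_empty] at hx; cases hx
    · intro x y
      rw [pvEqCl_nil]
      unfold pvRootB
      simp [PySem.Dict.getD_empty]
  | append_singleton ps c ih =>
    rw [List.foldl_append]
    simp only [List.foldl_cons, List.foldl_nil]
    obtain ⟨hInv, heq⟩ := ih
    obtain ⟨hInv', heq'⟩ := pvStepB_spec hInv c.1 c.2
    refine ⟨hInv', ?_⟩
    intro x y
    rw [heq' x y, heq x y, heq x c.1, heq y c.2, heq x c.2, heq y c.1, pvEqCl_snoc]

theorem pvCheckA_eq (D : PySem.Dict String String) :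
    ∀ (zs : List (String × String)) (p : PySem.Dict String String), pvInvA p →
    (∀ x y, pvEqA p x y ↔ pvRootB D x = pvRootB D y) →
    pvCheckA p zs = zs.all (fun uv => D.getD uv.1 uv.1 == D.getD uv.2 uv.2) := by
  intro zs
  induction zs with
  | nil => intro p _ _; rfl
  | cons w rest ih =>
    intro p hInv hEq
    obtain ⟨h1, hInv1, hiff1⟩ := pvFind_spec hInv w.1
    obtain ⟨h2, hInv2, hiff2⟩ := pvFind_spec hInv1 w.2
    have h2' : pvIsRootOf p w.2 (pvFind (pvFind p w.1).2 w.2).1 := (hiff1 _ _).1 h2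
    have hcheck : pvCheckA p (w :: rest) =
        (if (pvFind p w.1).1 ≠ (pvFind (pvFind p w.1).2 w.2).1 then false
         else pvCheckA (pvFind (pvFind p w.1).2 w.2).2 rest) := rfl
    rw [hcheck, List.all_cons]
    have hiffall : ∀ x y, pvEqA (pvFind (pvFind p w.1).2 w.2).2 x y ↔
        pvRootB D x = pvRootB D y := by
      intro x y
      rw [pvEqA_congr (fun x r => (hiff2 x r).trans (hiff1 x r))]
      exact hEq x y
    have hroots : ((pvFind p w.1).1 = (pvFind (pvFind p w.1).2 w.2).1) ↔ pvEqA p w.1 w.2 :=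
      (pvEqA_iff_roots h1 h2').symm
    by_cases hr : (pvFind p w.1).1 = (pvFind (pvFind p w.1).2 w.2).1
    · rw [if_neg (not_ne_iff.2 hr)]
      have hDeq : pvRootB D w.1 = pvRootB D w.2 := (hEq _ _).1 (hroots.1 hr)
      have hbeq : (D.getD w.1 w.1 == D.getD w.2 w.2) = true := beq_iff_eq.2 hDeq
      rw [hbeq, Bool.true_and]
      exact ih _ hInv2 hiffall
    · rw [if_pos hr]
      have hne : pvRootB D w.1 ≠ pvRootB D w.2 := fun h => hr (hroots.2 ((hEq _ _).2 h))
      have hbeq : (D.getD w.1 w.1 == D.getD w.2 w.2) = false := by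
        rw [beq_eq_false_iff_ne]; exact hne
      rw [hbeq, Bool.false_and]

-- ===== VERDICT (by name: the statement is the Claim_ definition above) =====
theorem doit_disjoint_spec : Claim_equal_doit_disjoint := by
  intro words1 words2 pairs _
  show doit_disjoint words1 words2 pairs = doit_disjoint_alt words1 words2 pairs
  unfold doit_disjoint doit_disjoint_alt
  by_cases hlen : words1.length ≠ words2.length
  · rw [if_pos hlen, if_pos hlen]
  · rw [if_neg hlen, if_neg hlen]
    obtain ⟨hInvA, heqA⟩ := pvFoldA_spec pairs
    obtain ⟨hInvB, heqB⟩ := pvFoldB_spec pairs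
    exact pvCheckA_eq _ (words1.zip words2) _ hInvA
      (fun x y => (heqA x y).trans (heqB x y).symm)
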